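-- pv_equiv track=rewrite | github.com/crunchypi/TwitterNoodle | packages/cleaning/basic_cleaner.py | clean_punctuation
-- ===== SOURCE A (Python) =====
-- def clean_punctuation(content:str) -> str:
--     """ This method removes punctuation AND
--         numbers (leaving only alpha), from
--         a string before returning it back.
--     """
--     new_string = ""
--     str_split = content.split()
--     for chunk in str_split:
--         tmp = ""
--         for char in chunk:
--             if char.isalpha():
--                 tmp += char
--         if len(tmp) > 0:
--             new_string += f" {tmp}" # // could check if tmp only contains space.
--     return new_string
-- ===== SOURCE B (Python) =====
-- def clean_punctuation(content: str) -> str: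
--     """Single character-by-character scan with a current-word buffer
--     instead of split() plus nested chunk/char loops."""
--     res = ""
--     buf = ""
--     for ch in content:
--         if ch.isalpha():
--             buf += ch
--         elif ch.isspace():
--             if buf:
--                 res += " " + buf
--                 buf = ""
--     return res + (" " + buf) if buf else res
-- ===== Notes on version B (the rewrite author's own statement) =====
-- stated objective: alternative
-- what changed: Replaced split() with nested chunk/char loops by a single flat character scan maintaining a current-word buffer that is flushed at whitespace and at the end.
import Mathlib
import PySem

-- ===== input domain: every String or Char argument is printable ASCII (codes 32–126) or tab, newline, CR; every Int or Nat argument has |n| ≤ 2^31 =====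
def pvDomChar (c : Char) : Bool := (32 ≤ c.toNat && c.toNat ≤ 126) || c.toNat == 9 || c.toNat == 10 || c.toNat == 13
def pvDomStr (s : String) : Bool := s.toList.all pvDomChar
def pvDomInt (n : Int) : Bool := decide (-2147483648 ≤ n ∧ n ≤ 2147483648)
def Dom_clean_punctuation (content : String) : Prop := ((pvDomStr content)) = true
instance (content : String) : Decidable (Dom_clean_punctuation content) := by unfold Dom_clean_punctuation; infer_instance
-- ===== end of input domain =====

-- B replaces split() plus nested chunk/char loops by one flat buffered character scan (alternative decomposition, same cost).

-- ===== PORT A =====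
-- inner loop: tmp = ""; for char in chunk: if char.isalpha(): tmp += char
def pvTmpA (chunk : List Char) : List Char :=
  chunk.foldl (fun tmp ch => if PySem.Chars.isalpha ch then tmp ++ [ch] else tmp) []

-- outer loop: for chunk in str_split: … if len(tmp) > 0: new_string += f" {tmp}"
def pvLoopA (chunks : List (List Char)) : List Char :=
  chunks.foldl (fun ns chunk =>
    let tmp := pvTmpA chunk
    if 0 < tmp.length then ns ++ ' ' :: tmp else ns) []

def clean_punctuation (content : String) : String :=
  String.ofList (pvLoopA (PySem.Chars.split₀ content.toList))

-- ===== PORT B =====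
-- one step of the scan: state = (res, buf)
def pvStepB (st : List Char × List Char) (c : Char) : List Char × List Char :=
  if PySem.Chars.isalpha c then (st.1, st.2 ++ [c])
  else if PySem.Chars.isspace c then
    (if st.2 = [] then st else (st.1 ++ ' ' :: st.2, []))
  else st

def clean_punctuation_alt (content : String) : String :=
  let st := content.toList.foldl pvStepB ([], [])
  String.ofList (if st.2 = [] then st.1 else st.1 ++ ' ' :: st.2)

-- ===== PRECONDITION & SPEC =====
def Spec_clean_punctuation (content : String) (out : String) : Prop := out = clean_punctuation_alt content
instance (content : String) (out : String) : Decidable (Spec_clean_punctuation content out) := by unfold Spec_clean_punctuation; infer_instance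

-- ===== CLAIM (what is proved, stated in full; the proofs are below) =====
def Claim_equal_clean_punctuation : Prop := ∀ (content : String), Dom_clean_punctuation content → Spec_clean_punctuation content (clean_punctuation content)

-- ===== LEMMAS AND PROOFS =====

-- the list of emitted characters, word by word
def pvW : List (List Char) → List Char
  | [] => []
  | ch :: rest =>
      (if ch.filter PySem.Chars.isalpha = [] then [] else ' ' :: ch.filter PySem.Chars.isalpha) ++ pvW rest

theorem pvGoNil (cur : List Char) (accL : List (List Char)) :
    PySem.Chars.split₀.go [] cur accL =
      if cur.isEmpty then accL.reverse else (cur.reverse :: accL).reverse := rfl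

theorem pvGoCons (c : Char) (rest cur : List Char) (accL : List (List Char)) :
    PySem.Chars.split₀.go (c :: rest) cur accL =
      if PySem.Chars.isspace c then
        (if cur.isEmpty then PySem.Chars.split₀.go rest [] accL
         else PySem.Chars.split₀.go rest [] (cur.reverse :: accL))
      else PySem.Chars.split₀.go rest (c :: cur) accL := rfl

theorem pvTmpA_eq (chunk : List Char) : pvTmpA chunk = chunk.filter PySem.Chars.isalpha := by
  have h := PySem.List.foldl_append_if PySem.Chars.isalpha (fun c => c) chunk []
  simpa [pvTmpA, List.map_id] using h

theorem pvLoopA_eq (chunks : List (List Char)) (acc : List Char) :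
    chunks.foldl (fun ns chunk =>
      let tmp := pvTmpA chunk
      if 0 < tmp.length then ns ++ ' ' :: tmp else ns) acc = acc ++ pvW chunks := by
  induction chunks generalizing acc with
  | nil => simp [pvW]
  | cons ch rest ih =>
      simp only [List.foldl_cons]
      rw [ih]
      rcases h : ch.filter PySem.Chars.isalpha with _ | ⟨c, cs⟩ <;>
        simp [pvW, pvTmpA_eq, h]

theorem pvGo_acc (cs : List Char) (cur : List Char) (acc : List (List Char)) :
    PySem.Chars.split₀.go cs cur acc = acc.reverse ++ PySem.Chars.split₀.go cs cur [] := by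
  induction cs generalizing cur acc with
  | nil =>
      by_cases h : cur.isEmpty = true <;> simp [pvGoNil, h]
  | cons c rest ih =>
      by_cases hs : PySem.Chars.isspace c = true
      · by_cases h : cur.isEmpty = true
        · simp only [pvGoCons, hs, h, if_true]
          exact ih [] acc
        · simp only [pvGoCons, hs, h, if_true, Bool.false_eq_true, if_false]
          rw [ih [] (cur.reverse :: acc), ih [] [cur.reverse]]
          simp
      · simp only [pvGoCons, hs, Bool.false_eq_true, if_false]
        exact ih (c :: cur) acc

theorem pvStepB_prefix (cs : List Char) (res buf : List Char) :
    cs.foldl pvStepB (res, buf) =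
      (res ++ (cs.foldl pvStepB ([], buf)).1, (cs.foldl pvStepB ([], buf)).2) := by
  induction cs generalizing res buf with
  | nil => simp
  | cons c rest ih =>
      simp only [List.foldl_cons]
      by_cases ha : PySem.Chars.isalpha c = true
      · simpa [pvStepB, ha] using ih res (buf ++ [c])
      · by_cases hs : PySem.Chars.isspace c = true
        · by_cases hb : buf = []
          · simpa [pvStepB, ha, hs, hb] using ih res []
          · rw [show pvStepB (res, buf) c = (res ++ ' ' :: buf, []) by simp [pvStepB, ha, hs, hb],
                show pvStepB (([], buf) : List Char × List Char) c = (' ' :: buf, []) by simp [pvStepB, ha, hs, hb],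
                ih (res ++ ' ' :: buf) [], ih (' ' :: buf) []]
            simp
        · simpa [pvStepB, ha, hs] using ih res buf

theorem pv_alpha_not_space (c : Char) (h : PySem.Chars.isalpha c = true) :
    PySem.Chars.isspace c = false := by
  simp only [PySem.Chars.isalpha, PySem.Chars.isupper, PySem.Chars.islower,
    Bool.or_eq_true, Bool.and_eq_true, decide_eq_true_eq] at h
  have hn : (65 ≤ c.toNat ∧ c.toNat ≤ 90) ∨ (97 ≤ c.toNat ∧ c.toNat ≤ 122) := by
    rcases h with ⟨h1, h2⟩ | ⟨h1, h2⟩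
    · exact Or.inl ⟨Fin.mk_le_mk.mp h1, Fin.mk_le_mk.mp h2⟩
    · exact Or.inr ⟨Fin.mk_le_mk.mp h1, Fin.mk_le_mk.mp h2⟩
  simp only [PySem.Chars.isspace, Bool.or_eq_false_iff, Bool.and_eq_false_iff,
    decide_eq_false_iff_not]
  omega

-- the main invariant: B's scan started with buffer (cur.reverse).filter isalpha
-- computes exactly the words A extracts from split₀.go cs cur []
theorem pv_main (cs : List Char) (cur : List Char) :
    (let st := cs.foldl pvStepB ([], cur.reverse.filter PySem.Chars.isalpha)
     if st.2 = [] then st.1 else st.1 ++ ' ' :: st.2)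
      = pvW (PySem.Chars.split₀.go cs cur []) := by
  induction cs generalizing cur with
  | nil =>
      by_cases h : cur.isEmpty = true
      · rcases List.isEmpty_iff.mp h with rfl
        simp [pvGoNil, pvW]
      · simp only [pvGoNil, h, Bool.false_eq_true, if_false, List.foldl_nil]
        rcases hf : cur.reverse.filter PySem.Chars.isalpha with _ | ⟨c, t⟩ <;>
          simp [pvW, hf]
  | cons c rest ih =>
      by_cases ha : PySem.Chars.isalpha c = true
      · have hs := pv_alpha_not_space c ha
        have h1 : PySem.Chars.split₀.go (c :: rest) cur [] = PySem.Chars.split₀.go rest (c :: cur) [] := by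
          rw [pvGoCons]; simp [hs]
        have h2 : (c :: cur).reverse.filter PySem.Chars.isalpha
            = cur.reverse.filter PySem.Chars.isalpha ++ [c] := by
          simp [List.filter_append, ha]
        rw [h1, ← ih (c :: cur), h2]
        simp [pvStepB, ha]
      · by_cases hs : PySem.Chars.isspace c = true
        · by_cases h : cur.isEmpty = true
          · rcases List.isEmpty_iff.mp h with rfl
            have h1 : PySem.Chars.split₀.go (c :: rest) [] [] = PySem.Chars.split₀.go rest [] [] := by
              rw [pvGoCons, if_pos hs]; simp
            rw [h1, ← ih []]
            simp [pvStepB, ha, hs]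
          · have h1 : PySem.Chars.split₀.go (c :: rest) cur []
                = [cur.reverse] ++ PySem.Chars.split₀.go rest [] [] := by
              rw [pvGoCons, if_pos hs, if_neg (by simp [h]), pvGo_acc rest [] [cur.reverse]]
              simp
            rw [h1]
            have hW : pvW ([cur.reverse] ++ PySem.Chars.split₀.go rest [] [])
                = (if cur.reverse.filter PySem.Chars.isalpha = [] then []
                   else ' ' :: cur.reverse.filter PySem.Chars.isalpha)
                  ++ pvW (PySem.Chars.split₀.go rest [] []) := by
              simp [pvW]
            rw [hW, ← ih []]
            rcases hf : cur.reverse.filter PySem.Chars.isalpha with _ | ⟨x, t⟩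
            · simp [List.foldl_cons, pvStepB, ha, hs]
            · simp only [List.foldl_cons,
                show pvStepB (([], x :: t) : List Char × List Char) c = (' ' :: x :: t, []) by
                  simp [pvStepB, ha, hs]]
              rw [pvStepB_prefix rest (' ' :: x :: t) []]
              rcases h2 : (rest.foldl pvStepB (([], []) : List Char × List Char)).2 with _ | ⟨y, u⟩ <;>
                simp [h2]
        · have h1 : PySem.Chars.split₀.go (c :: rest) cur [] = PySem.Chars.split₀.go rest (c :: cur) [] := by
            rw [pvGoCons]; simp [hs]
          have h2 : (c :: cur).reverse.filter PySem.Chars.isalpha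
              = cur.reverse.filter PySem.Chars.isalpha := by
            simp [List.filter_append, ha]
          rw [h1, ← ih (c :: cur), h2]
          simp [pvStepB, ha, hs]

-- ===== VERDICT (by name: the statement is the Claim_ definition above) =====
theorem clean_punctuation_spec : Claim_equal_clean_punctuation := by
  intro content _
  unfold Spec_clean_punctuation clean_punctuation clean_punctuation_alt
  have h := pv_main content.toList []
  simp only [List.reverse_nil, List.filter_nil] at h
  rw [pvLoopA, pvLoopA_eq, List.nil_append, PySem.Chars.split₀, ← h]
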